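-- pv_equiv track=rewrite | github.com/vanman2024/ai-dev-marketplace | plugins/payments/skills/webhook-security/templates/retry_handler.py | is_permanent_failure
-- ===== SOURCE A (Python) =====
-- def is_permanent_failure(error_message: str) -> bool:
--     """
--     Determine if error is permanent (should not retry)
--
--     Args:
--         error_message: Error message from processing
--
--     Returns:
--         True if error is permanent
--     """
--     # Patterns indicating permanent failures
--     permanent_errors = [
--         "invalid payload",
--         "malformed json",
--         "missing required field",
--         "invalid event type",
--         "unauthorized",
--         "forbidden",
--         "not found",
--         "duplicate",
--         "already processed"
--     ]
--
--     error_lower = error_message.lower()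
--     return any(pattern in error_lower for pattern in permanent_errors)
-- ===== SOURCE B (Python) =====
-- def is_permanent_failure(error_message: str) -> bool:
--     """Position-major scan: walk the lowered message once and at each position
--     test whether any permanent-failure phrase starts there."""
--     permanent_errors = [
--         "invalid payload",
--         "malformed json",
--         "missing required field",
--         "invalid event type",
--         "unauthorized",
--         "forbidden",
--         "not found",
--         "duplicate",
--         "already processed"
--     ]
--     low = error_message.lower()
--     for i in range(len(low)):
--         if any(low.startswith(p, i) for p in permanent_errors):
--             return True
--     return False
-- ===== Notes on version B (the rewrite author's own statement) =====
-- stated objective: alternative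
-- what changed: Replaced nine independent substring scans ('pattern in msg' per pattern) by a single position-major sweep of the lowered message that tests all patterns as prefixes at each position.
import Mathlib
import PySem

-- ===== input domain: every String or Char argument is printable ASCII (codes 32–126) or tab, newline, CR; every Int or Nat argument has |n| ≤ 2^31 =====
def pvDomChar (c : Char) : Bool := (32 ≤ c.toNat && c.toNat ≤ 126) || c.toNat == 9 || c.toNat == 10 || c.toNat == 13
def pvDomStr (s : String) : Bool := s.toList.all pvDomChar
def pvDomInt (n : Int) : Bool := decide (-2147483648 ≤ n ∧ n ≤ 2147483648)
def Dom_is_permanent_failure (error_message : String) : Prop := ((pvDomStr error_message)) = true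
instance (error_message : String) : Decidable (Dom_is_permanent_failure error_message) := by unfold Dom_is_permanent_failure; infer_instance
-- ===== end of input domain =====

-- ===== PORT A =====
-- A: pattern-major — for each pattern, test 'pattern in error_lower'.
def pvPermanentErrors : List String :=
  ["invalid payload", "malformed json", "missing required field", "invalid event type",
   "unauthorized", "forbidden", "not found", "duplicate", "already processed"]

def is_permanent_failure (error_message : String) : Bool :=
  let error_lower := PySem.Str.lower error_message
  pvPermanentErrors.any (fun pattern => PySem.Str.isIn pattern error_lower)

-- ===== PORT B =====
-- B: position-major — one sweep over the lowered message, testing every pattern as a prefix at each position.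
def is_permanent_failure_alt (error_message : String) : Bool :=
  let low := PySem.Chars.lower error_message.toList
  (List.range low.length).any (fun i =>
    -- low.startswith(p, i): p matches at position i, i.e. p is a prefix of low.drop i
    pvPermanentErrors.any (fun p => PySem.Chars.startswith (low.drop i) p.toList))

-- ===== PRECONDITION & SPEC =====
def Spec_is_permanent_failure (error_message : String) (out : Bool) : Prop := out = is_permanent_failure_alt error_message
instance (error_message : String) (out : Bool) : Decidable (Spec_is_permanent_failure error_message out) := by unfold Spec_is_permanent_failure; infer_instance

-- ===== CLAIM (what is proved, stated in full; the proofs are below) =====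
def Claim_equal_is_permanent_failure : Prop := ∀ (error_message : String), Dom_is_permanent_failure error_message → Spec_is_permanent_failure error_message (is_permanent_failure error_message)

-- ===== LEMMAS AND PROOFS =====
-- Every permanent-failure phrase is nonempty, so a prefix occurrence must start inside the string.
lemma pvPerm_ne_nil (p : String) (hp : p ∈ pvPermanentErrors) : p.toList ≠ [] := by
  simp only [pvPermanentErrors, List.mem_cons, List.not_mem_nil, or_false] at hp
  rcases hp with h|h|h|h|h|h|h|h|h <;> subst h <;> decide

lemma pv_main (error_message : String) :
    is_permanent_failure error_message = is_permanent_failure_alt error_message := by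
  simp only [is_permanent_failure, is_permanent_failure_alt]
  rw [Bool.eq_iff_iff]
  simp only [List.any_eq_true, List.mem_range, PySem.Chars.startswith_iff,
    PySem.Str.isIn_eq, PySem.Str.toList_lower,
    ← PySem.Chars.exists_prefix_drop_iff_isIn]
  constructor
  · rintro ⟨p, hp, j, hpre⟩
    have hne := pvPerm_ne_nil p hp
    have hdrop : (PySem.Chars.lower error_message.toList).drop j ≠ [] := by
      intro h; rw [h] at hpre; exact hne (List.prefix_nil.mp hpre)
    have hj : j < (PySem.Chars.lower error_message.toList).length := by
      by_contra hle
      exact hdrop (List.drop_eq_nil_of_le (by omega))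
    exact ⟨j, hj, p, hp, hpre⟩
  · rintro ⟨i, _, p, hp, hpre⟩
    exact ⟨p, hp, i, hpre⟩

-- ===== VERDICT (by name: the statement is the Claim_ definition above) =====
theorem is_permanent_failure_spec : Claim_equal_is_permanent_failure := by
  intro e _
  unfold Spec_is_permanent_failure
  exact pv_main e
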